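-- pv_equiv track=rewrite | github.com/MrBrantCode/unitest_baseline | mut_generate/mist_train_taco/taco_7992/solution.py | calculate_minimum_page_turns
-- ===== SOURCE A (Python) =====
-- def calculate_minimum_page_turns(n, m, pages):
--     def median(a):
--         if len(a) == 0:
--             return 0
--         if len(a) % 2 == 1:
--             return a[len(a) // 2]
--         else:
--             return (a[len(a) // 2] + a[len(a) // 2 - 1]) // 2
--
--     def profit(a, old_val):
--         a.sort()
--         med = median(a)
--         sum_old = 0
--         sum_new = 0
--         for i in a:
--             sum_old += abs(i - old_val)
--             sum_new += abs(i - med)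
--         return sum_old - sum_new
--
--     count = {pages[0]: []}
--     current_page_switches = 0
--
--     for i in range(1, len(pages)):
--         cur_i = pages[i]
--         prev_i = pages[i - 1]
--         if not cur_i in count:
--             count[cur_i] = []
--         if cur_i != prev_i:
--             count[cur_i].append(prev_i)
--             count[prev_i].append(cur_i)
--             current_page_switches += abs(cur_i - prev_i)
--
--     max_profit = 0
--     for i in count:
--         if len(count[i]) > 0:
--             tmp = profit(count[i], i)
--             if tmp > max_profit:
--                 max_profit = tmp
--
--     min_page_turns = current_page_switches - max_profit
--     return min_page_turns
-- ===== SOURCE B (Python) =====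
-- def calculate_minimum_page_turns(n, m, pages):
--     total = 0
--     nbrs = {}
--     for prev, cur in zip(pages, pages[1:]):
--         if cur != prev:
--             total += abs(cur - prev)
--             nbrs.setdefault(prev, []).append(cur)
--             nbrs.setdefault(cur, []).append(prev)
--     best = 0
--     for v, a in nbrs.items():
--         sum_old = sum(abs(x - v) for x in a)
--         sum_new = min(sum(abs(x - c) for x in a) for c in a)
--         if sum_old - sum_new > best:
--             best = sum_old - sum_new
--     return total - best
-- ===== Notes on version B (the rewrite author's own statement) =====
-- stated objective: alternative
-- what changed: B replaces A's sort-then-median profit computation per page value by a brute-force scan that takes the minimum of the summed absolute deviations over the neighbour values themselves (the optimum is always attained at a list element), and builds the neighbour dictionary from consecutive pairs via zip/setdefault instead of index arithmetic.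
import Mathlib
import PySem

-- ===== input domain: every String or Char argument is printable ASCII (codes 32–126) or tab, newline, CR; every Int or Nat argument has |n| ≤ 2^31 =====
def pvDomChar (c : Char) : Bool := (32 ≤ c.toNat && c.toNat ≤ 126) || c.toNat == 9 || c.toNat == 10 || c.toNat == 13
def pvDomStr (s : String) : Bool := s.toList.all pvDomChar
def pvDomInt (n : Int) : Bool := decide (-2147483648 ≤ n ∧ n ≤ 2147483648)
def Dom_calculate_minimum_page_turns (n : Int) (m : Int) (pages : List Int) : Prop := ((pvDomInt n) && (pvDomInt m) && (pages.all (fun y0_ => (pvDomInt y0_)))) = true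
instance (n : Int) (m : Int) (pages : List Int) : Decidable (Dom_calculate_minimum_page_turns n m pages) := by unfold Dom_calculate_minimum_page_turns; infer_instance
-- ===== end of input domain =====

-- B replaces A's sort+median profit computation by a brute-force minimum over the neighbour values
-- (the sum of absolute deviations is minimised at an element of the list); objective: alternative algorithm.

-- ===== PORT A =====
def pvMedian (a : List Int) : Int :=
  if a.length = 0 then 0
  else if a.length % 2 = 1 then PySem.List.pyGetD a ((a.length / 2 : Nat) : Int) 0
  else PySem.Int.floordiv
        (PySem.List.pyGetD a ((a.length / 2 : Nat) : Int) 0 +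
         PySem.List.pyGetD a ((a.length / 2 - 1 : Nat) : Int) 0) 2

def pvProfit (a : List Int) (old_val : Int) : Int :=
  let s := PySem.List.sorted a (fun x => x) false
  let med := pvMedian s
  let p := s.foldl (fun (acc : Int × Int) i => (acc.1 + |i - old_val|, acc.2 + |i - med|)) (0, 0)
  p.1 - p.2

-- A's first loop body: cur = pages[i], prev = pages[i-1]
def pvStepA (st : PySem.Dict Int (List Int) × Int) (prev cur : Int) :
    PySem.Dict Int (List Int) × Int :=
  let count := if st.1.contains cur then st.1 else st.1.insert cur []
  if cur ≠ prev then
    (((count.modify cur [] (· ++ [prev])).modify prev [] (· ++ [cur])), st.2 + |cur - prev|)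
  else (count, st.2)

def calculate_minimum_page_turns (n : Int) (m : Int) (pages : List Int) : Int :=
  match PySem.List.pyGet? pages 0 with
  | none => 0  -- Python raises IndexError on pages[0]; excluded by Pre_
  | some p0 =>
    let st := (PySem.List.pyRange 1 (pages.length : Int) 1).foldl
      (fun st i =>
        pvStepA st (PySem.List.pyGetD pages (i - 1) 0) (PySem.List.pyGetD pages i 0))
      ((PySem.Dict.empty.insert p0 []), 0)
    let max_profit := st.1.keys.foldl
      (fun (mp : Int) k =>
        let l := st.1.getD k []
        if l.length > 0 then
          let tmp := pvProfit l k
          if tmp > mp then tmp else mp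
        else mp) 0
    st.2 - max_profit

-- ===== PORT B =====
def pvAbsSum (a : List Int) (v : Int) : Int := (a.map (fun x => |x - v|)).sum

-- B's first loop body over consecutive pairs (prev, cur)
def pvStepB (st : PySem.Dict Int (List Int) × Int) (prev cur : Int) :
    PySem.Dict Int (List Int) × Int :=
  if cur ≠ prev then
    ((((st.1.setdefault prev []).modify prev [] (· ++ [cur])).setdefault cur []).modify cur
        [] (· ++ [prev]),
      st.2 + |cur - prev|)
  else st

def calculate_minimum_page_turns_alt (n : Int) (m : Int) (pages : List Int) : Int :=
  let st := (pages.zip (PySem.List.slice pages (some 1) none)).foldl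
    (fun st pc => pvStepB st pc.1 pc.2) (PySem.Dict.empty, 0)
  let best := st.1.items.foldl
    (fun (best : Int) va =>
      let sum_old := pvAbsSum va.2 va.1
      let sum_new := (PySem.List.min? (va.2.map (fun c => pvAbsSum va.2 c)) (fun x => x)).getD 0
      if sum_old - sum_new > best then sum_old - sum_new else best) 0
  st.2 - best

-- ===== PRECONDITION & SPEC =====
-- Pre_ excludes only the empty list, on which A raises IndexError (pages[0]).
def Pre_calculate_minimum_page_turns (n : Int) (m : Int) (pages : List Int) : Prop := pages ≠ []
instance (n : Int) (m : Int) (pages : List Int) : Decidable (Pre_calculate_minimum_page_turns n m pages) := by unfold Pre_calculate_minimum_page_turns; infer_instance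

def pvWitness_calculate_minimum_page_turns : Int × Int × List Int := (0, 0, [1, 3, 1])

def Spec_calculate_minimum_page_turns (n : Int) (m : Int) (pages : List Int) (out : Int) : Prop := out = calculate_minimum_page_turns_alt n m pages
instance (n : Int) (m : Int) (pages : List Int) (out : Int) : Decidable (Spec_calculate_minimum_page_turns n m pages out) := by unfold Spec_calculate_minimum_page_turns; infer_instance

-- ===== CLAIM (what is proved, stated in full; the proofs are below) =====
def Claim_equal_calculate_minimum_page_turns : Prop := ∀ (n : Int) (m : Int) (pages : List Int), Dom_calculate_minimum_page_turns n m pages → Pre_calculate_minimum_page_turns n m pages → Spec_calculate_minimum_page_turns n m pages (calculate_minimum_page_turns n m pages)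


-- ===== LEMMAS AND PROOFS =====

-- ---- The median/minimum core ----

theorem pvPairBound {a b m v : Int} (h1 : a ≤ m) (h2 : m ≤ b) :
    |a - m| + |b - m| ≤ |a - v| + |b - v| := by
  have ha : |a - m| = m - a := by rw [abs_sub_comm]; exact abs_of_nonneg (by linarith)
  have hb : |b - m| = b - m := abs_of_nonneg (by linarith)
  have h3 : v - a ≤ |a - v| := by rw [abs_sub_comm]; exact le_abs_self _
  have h4 : b - v ≤ |b - v| := le_abs_self _
  linarith

theorem pvAbsSum_range (s : List Int) (v : Int) :
    pvAbsSum s v = ∑ i ∈ Finset.range s.length, |s.getD i 0 - v| := by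
  induction s with
  | nil => simp [pvAbsSum]
  | cons x t ih =>
    simp only [List.length_cons]
    rw [Finset.sum_range_succ']
    simp only [List.getD_cons_succ, List.getD_cons_zero]
    rw [← ih]
    simp [pvAbsSum, add_comm]

theorem pvAbsSum_pair (s : List Int) (v : Int) :
    2 * pvAbsSum s v
      = ∑ i ∈ Finset.range s.length,
          (|s.getD i 0 - v| + |s.getD (s.length - 1 - i) 0 - v|) := by
  rw [Finset.sum_add_distrib, Finset.sum_range_reflect (fun i => |s.getD i 0 - v|) s.length,
    ← pvAbsSum_range, two_mul]

theorem pvSorted_getD_mono (a : List Int) {p q : Nat}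
    (hpq : p ≤ q) (hq : q < (PySem.List.sorted a (fun x => x) false).length) :
    (PySem.List.sorted a (fun x => x) false).getD p 0
      ≤ (PySem.List.sorted a (fun x => x) false).getD q 0 := by
  rw [List.getD_eq_getElem _ _ (lt_of_le_of_lt hpq hq), List.getD_eq_getElem _ _ hq]
  exact PySem.List.sorted_id_getElem_mono a hpq hq

theorem pvMid_min' (s : List Int)
    (hmono : ∀ p q : Nat, p ≤ q → q < s.length → s.getD p 0 ≤ s.getD q 0)
    (hne : s ≠ []) (m v : Int)
    (hlo : s.getD ((s.length - 1) / 2) 0 ≤ m)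
    (hhi : m ≤ s.getD (s.length / 2) 0) :
    pvAbsSum s m ≤ pvAbsSum s v := by
  have hk : 0 < s.length := List.length_pos_iff.mpr hne
  have h2 : 2 * pvAbsSum s m ≤ 2 * pvAbsSum s v := by
    rw [pvAbsSum_pair, pvAbsSum_pair]
    apply Finset.sum_le_sum
    intro i hi
    rw [Finset.mem_range] at hi
    by_cases hij : i ≤ s.length - 1 - i
    · have h1 : s.getD i 0 ≤ s.getD ((s.length - 1) / 2) 0 := hmono _ _ (by omega) (by omega)
      have h2 : s.getD (s.length / 2) 0 ≤ s.getD (s.length - 1 - i) 0 :=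
        hmono _ _ (by omega) (by omega)
      exact pvPairBound (by linarith) (by linarith)
    · have h1 : s.getD (s.length - 1 - i) 0 ≤ s.getD ((s.length - 1) / 2) 0 :=
        hmono _ _ (by omega) (by omega)
      have h2 : s.getD (s.length / 2) 0 ≤ s.getD i 0 := hmono _ _ (by omega) hi
      have := pvPairBound (a := s.getD (s.length - 1 - i) 0) (b := s.getD i 0)
        (m := m) (v := v) (by linarith) (by linarith)
      linarith
  linarith

theorem pvMedian_bounds' (s : List Int)
    (hmono : ∀ p q : Nat, p ≤ q → q < s.length → s.getD p 0 ≤ s.getD q 0)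
    (hne : s ≠ []) :
    s.getD ((s.length - 1) / 2) 0 ≤ pvMedian s
      ∧ pvMedian s ≤ s.getD (s.length / 2) 0 := by
  have hk : 0 < s.length := List.length_pos_iff.mpr hne
  unfold pvMedian
  rw [if_neg (by omega)]
  by_cases hpar : s.length % 2 = 1
  · rw [if_pos hpar, PySem.List.pyGetD_natCast]
    have heq : (s.length - 1) / 2 = s.length / 2 := by omega
    rw [heq]
    exact ⟨le_refl _, le_refl _⟩
  · rw [if_neg hpar, PySem.List.pyGetD_natCast, PySem.List.pyGetD_natCast]
    have hidx : (s.length - 1) / 2 = s.length / 2 - 1 := by omega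
    have hle : s.getD (s.length / 2 - 1) 0 ≤ s.getD (s.length / 2) 0 :=
      hmono _ _ (by omega) (by omega)
    have hb := PySem.Int.floordiv_two_mid_bounds hle
    rw [hidx, add_comm]
    exact hb

theorem pvAbsSum_sorted (a : List Int) (c : Int) :
    pvAbsSum (PySem.List.sorted a (fun x => x) false) c = pvAbsSum a c :=
  List.Perm.sum_eq ((PySem.List.sorted_perm a (fun x => x) false).map _)

theorem pvProfit_split (a : List Int) (v : Int) :
    pvProfit a v
      = pvAbsSum (PySem.List.sorted a (fun x => x) false) v
        - pvAbsSum (PySem.List.sorted a (fun x => x) false)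
            (pvMedian (PySem.List.sorted a (fun x => x) false)) := by
  simp only [pvProfit]
  rw [PySem.List.foldl_prod_mk (f := fun acc i => acc + |i - v|)
    (g := fun acc i => acc + |i - pvMedian (PySem.List.sorted a (fun x => x) false)|)]
  simp [PySem.List.foldl_add, pvAbsSum]

theorem pvProfit_eq_min (a : List Int) (ha : a ≠ []) (v : Int) :
    pvProfit a v
      = pvAbsSum a v
        - (PySem.List.min? (a.map (fun c => pvAbsSum a c)) (fun x => x)).getD 0 := by
  have hne : PySem.List.sorted a (fun x => x) false ≠ [] := by
    rw [Ne, PySem.List.sorted_eq_nil_iff]; exact ha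
  have hk : 0 < (PySem.List.sorted a (fun x => x) false).length :=
    List.length_pos_iff.mpr hne
  have hmono : ∀ p q : Nat, p ≤ q → q < (PySem.List.sorted a (fun x => x) false).length →
      (PySem.List.sorted a (fun x => x) false).getD p 0
        ≤ (PySem.List.sorted a (fun x => x) false).getD q 0 :=
    fun p q hpq hq => pvSorted_getD_mono a hpq hq
  obtain ⟨c0, t, rfl⟩ : ∃ c0 t, a = c0 :: t := by
    cases a with
    | nil => exact absurd rfl ha
    | cons x xs => exact ⟨x, xs, rfl⟩
  rw [List.map_cons, PySem.List.min?_id_cons, Option.getD_some]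
  have hMle : ∀ c ∈ c0 :: t,
      List.foldl min (pvAbsSum (c0 :: t) c0) (t.map (fun c => pvAbsSum (c0 :: t) c))
        ≤ pvAbsSum (c0 :: t) c := by
    intro c hc
    rcases List.mem_cons.mp hc with rfl | hc
    · exact (PySem.List.foldl_min_le _ _).1
    · exact (PySem.List.foldl_min_le _ _).2 _ (List.mem_map_of_mem hc)
  have hMmem : ∃ c ∈ c0 :: t,
      List.foldl min (pvAbsSum (c0 :: t) c0) (t.map (fun c => pvAbsSum (c0 :: t) c))
        = pvAbsSum (c0 :: t) c := by
    rcases PySem.List.foldl_min_mem (t.map (fun c => pvAbsSum (c0 :: t) c))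
        (pvAbsSum (c0 :: t) c0) with h | h
    · exact ⟨c0, List.mem_cons_self, h⟩
    · obtain ⟨c, hc, hfc⟩ := List.mem_map.mp h
      exact ⟨c, List.mem_cons_of_mem _ hc, hfc.symm⟩
  have hmed := pvMedian_bounds' _ hmono hne
  have hup :
      List.foldl min (pvAbsSum (c0 :: t) c0) (t.map (fun c => pvAbsSum (c0 :: t) c))
        ≤ pvAbsSum (PySem.List.sorted (c0 :: t) (fun x => x) false)
            (pvMedian (PySem.List.sorted (c0 :: t) (fun x => x) false)) := by
    have hhi_mem : (PySem.List.sorted (c0 :: t) (fun x => x) false).getD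
        ((PySem.List.sorted (c0 :: t) (fun x => x) false).length / 2) 0 ∈ c0 :: t := by
      rw [List.getD_eq_getElem _ _ (by omega)]
      exact (PySem.List.mem_sorted _ _ _ _).mp (List.getElem_mem _)
    have h1 := hMle _ hhi_mem
    have h2 := pvMid_min' _ hmono hne _
      (pvMedian (PySem.List.sorted (c0 :: t) (fun x => x) false))
      (hmono _ _ (by omega) (by omega)) (le_refl _)
    rw [← pvAbsSum_sorted (c0 :: t) ((PySem.List.sorted (c0 :: t) (fun x => x) false).getD
      ((PySem.List.sorted (c0 :: t) (fun x => x) false).length / 2) 0)] at h1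
    linarith
  have hlow :
      pvAbsSum (PySem.List.sorted (c0 :: t) (fun x => x) false)
          (pvMedian (PySem.List.sorted (c0 :: t) (fun x => x) false))
        ≤ List.foldl min (pvAbsSum (c0 :: t) c0)
            (t.map (fun c => pvAbsSum (c0 :: t) c)) := by
    obtain ⟨c, hc, hMc⟩ := hMmem
    have := pvMid_min' _ hmono hne _ c hmed.1 hmed.2
    rw [hMc, ← pvAbsSum_sorted (c0 :: t) c]
    exact this
  rw [pvProfit_split, le_antisymm hup hlow, pvAbsSum_sorted]

-- ---- Dictionary helpers and the phase-1 invariant ----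

def pvUpd (k x : Int) (p : Int × List Int) : Int × List Int :=
  if p.1 == k then (k, p.2 ++ [x]) else p

def pvInv (w : Int) (sa sb : PySem.Dict Int (List Int) × Int) : Prop :=
  (sa = (PySem.Dict.mk [(w, [])], 0) ∧ sb = (PySem.Dict.empty, 0))
  ∨ (sa.1 = sb.1 ∧ sa.2 = sb.2 ∧ sb.1.contains w = true ∧ sb.1.keys.Nodup
      ∧ ∀ p ∈ sb.1.items, p.2 ≠ ([] : List Int))

theorem pvContains_eq_any (d : PySem.Dict Int (List Int)) (k : Int) :
    d.contains k = d.items.any (fun p => p.1 == k) := rfl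

theorem pvNotContains_forall {d : PySem.Dict Int (List Int)} {k : Int}
    (h : d.contains k = false) : ∀ p ∈ d.items, p.1 ≠ k := by
  rw [pvContains_eq_any] at h
  intro p hp hpk
  have := List.any_eq_false.mp h p hp
  simp [hpk] at this

theorem pvItems_modify_mem (d : PySem.Dict Int (List Int)) (k x : Int)
    (hk : d.contains k = true) (hnd : d.keys.Nodup) :
    (d.modify k [] (· ++ [x])).items = d.items.map (pvUpd k x) := by
  show (d.insert k (d.getD k [] ++ [x])).items = _
  rw [PySem.Dict.items_insert_of_contains _ _ hk]
  apply List.map_congr_left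
  intro p hp
  unfold pvUpd
  by_cases hpk : p.1 = k
  · simp only [hpk, BEq.rfl, if_true]
    have hmem : (k, p.2) ∈ d.items := by rw [← hpk]; exact hp
    rw [PySem.Dict.getD_of_mem_items d hmem hnd]
  · simp [hpk]


theorem pvMap_upd_id (I : List (Int × List Int)) (k x : Int)
    (h : ∀ p ∈ I, p.1 ≠ k) : I.map (pvUpd k x) = I := by
  have heq : ∀ p ∈ I, pvUpd k x p = id p := by
    intro p hp
    unfold pvUpd
    simp [h p hp]
  rw [List.map_congr_left heq, List.map_id]

theorem pvMap_upd_comm (I : List (Int × List Int)) (k k' x x' : Int) (h : k ≠ k') :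
    (I.map (pvUpd k x)).map (pvUpd k' x') = (I.map (pvUpd k' x')).map (pvUpd k x) := by
  rw [List.map_map, List.map_map]
  apply List.map_congr_left
  intro p _
  simp only [Function.comp]
  unfold pvUpd
  by_cases h1 : p.1 = k
  · have h2 : p.1 ≠ k' := by rw [h1]; exact h
    simp [h1, h2, h, Ne.symm h]
  · by_cases h2 : p.1 = k'
    · simp [h1, h2, Ne.symm h]
    · simp [h1, h2]

theorem pvFst_upd (k x : Int) (p : Int × List Int) : (pvUpd k x p).1 = p.1 := by
  unfold pvUpd
  split
  · next h => simp_all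
  · rfl

theorem pvKeys_eq (d : PySem.Dict Int (List Int)) : d.keys = d.items.map (·.1) := rfl

theorem pvSnd_map_upd {I : List (Int × List Int)} (k x : Int)
    (h : ∀ p ∈ I, p.2 ≠ ([] : List Int)) :
    ∀ p ∈ I.map (pvUpd k x), p.2 ≠ ([] : List Int) := by
  intro p hp
  obtain ⟨q, hq, rfl⟩ := List.mem_map.mp hp
  unfold pvUpd
  split
  · simp
  · exact h q hq

theorem pvKeys_map_upd (I : List (Int × List Int)) (k x : Int) :
    (I.map (pvUpd k x)).map (·.1) = I.map (·.1) := by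
  rw [List.map_map]
  apply List.map_congr_left
  intro p _
  exact pvFst_upd k x p

theorem pvAny_fst_map_upd (I : List (Int × List Int)) (k x j : Int) :
    ((I.map (pvUpd k x)).any (fun p => p.1 == j)) = (I.any (fun p => p.1 == j)) := by
  rw [List.any_map]
  apply PySem.List.any_congr_mem
  intro p _
  simp [Function.comp, pvFst_upd]

theorem pvNodup_append_key (I : List (Int × List Int)) (c : Int)
    (hnd : (I.map (·.1)).Nodup) (h : ∀ p ∈ I, p.1 ≠ c) :
    ((I.map (·.1)) ++ [c]).Nodup := by
  refine List.Nodup.append hnd (List.nodup_singleton c) ?_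
  intro a ha hb
  simp only [List.mem_singleton] at hb
  subst hb
  obtain ⟨p, hp, hpc⟩ := List.mem_map.mp ha
  exact h p hp hpc

theorem pvStep_inv (w c : Int) (sa sb : PySem.Dict Int (List Int) × Int)
    (h : pvInv w sa sb) : pvInv c (pvStepA sa w c) (pvStepB sb w c) := by
  rcases h with ⟨ha, hb⟩ | ⟨hd, ht, hcw, hnd, hvals⟩
  · -- no-switch-yet state
    subst ha; subst hb
    by_cases hc : c = w
    · subst hc
      left
      constructor
      · show pvStepA (PySem.Dict.mk [(c, [])], 0) c c = _
        unfold pvStepA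
        simp [pvContains_eq_any]
      · show pvStepB (PySem.Dict.empty, 0) c c = _
        unfold pvStepB
        simp
    · -- first switch: both dicts become {w: [c], c: [w]}
      have hwc : (w == c) = false := by simp [Ne.symm hc]
      have h1 : (PySem.Dict.mk [(w, ([] : List Int))]).contains c = false := by
        simp [pvContains_eq_any, hwc]
      unfold pvStepA pvStepB
      simp only [h1, Bool.false_eq_true, if_false, ne_eq, hc, not_false_eq_true, if_true,
        PySem.Dict.contains_empty, PySem.Dict.setdefault_of_not_contains PySem.Dict.empty []]
      -- A-side items
      have hA1 : ((PySem.Dict.mk [(w, ([] : List Int))]).insert c []).items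
          = [(w, ([] : List Int)), (c, [])] :=
        PySem.Dict.items_insert_of_not_contains _ _ h1
      have hA2c : ((PySem.Dict.mk [(w, ([] : List Int))]).insert c []).contains c = true := by
        rw [pvContains_eq_any, hA1]; simp
      have hA2n : ((PySem.Dict.mk [(w, ([] : List Int))]).insert c []).keys.Nodup := by
        rw [pvKeys_eq, hA1]; simp [hc, Ne.symm hc]
      have hA3 : (((PySem.Dict.mk [(w, ([] : List Int))]).insert c []).modify c []
          (· ++ [w])).items = [(w, ([] : List Int)), (c, [w])] := by
        rw [pvItems_modify_mem _ _ _ hA2c hA2n, hA1]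
        simp [pvUpd, hwc]
      have hA4c : (((PySem.Dict.mk [(w, ([] : List Int))]).insert c []).modify c []
          (· ++ [w])).contains w = true := by
        rw [pvContains_eq_any, hA3]; simp
      have hA4n : (((PySem.Dict.mk [(w, ([] : List Int))]).insert c []).modify c []
          (· ++ [w])).keys.Nodup := by
        rw [pvKeys_eq, hA3]; simp [hc, Ne.symm hc]
      have hA5 : ((((PySem.Dict.mk [(w, ([] : List Int))]).insert c []).modify c []
          (· ++ [w])).modify w [] (· ++ [c])).items = [(w, [c]), (c, [w])] := by
        rw [pvItems_modify_mem _ _ _ hA4c hA4n, hA3]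
        simp [pvUpd, hwc, hc, Ne.symm hc]
      -- B-side items
      have hB1 : (PySem.Dict.empty.insert w ([] : List Int)).items = [(w, ([] : List Int))] :=
        PySem.Dict.items_insert_of_not_contains _ _ (PySem.Dict.contains_empty w)
      have hB1c : (PySem.Dict.empty.insert w ([] : List Int)).contains w = true := by
        rw [pvContains_eq_any, hB1]; simp
      have hB1n : (PySem.Dict.empty.insert w ([] : List Int)).keys.Nodup := by
        rw [pvKeys_eq, hB1]; simp
      have hB2 : ((PySem.Dict.empty.insert w ([] : List Int)).modify w [] (· ++ [c])).items
          = [(w, [c])] := by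
        rw [pvItems_modify_mem _ _ _ hB1c hB1n, hB1]
        simp [pvUpd]
      have hB2c : ((PySem.Dict.empty.insert w ([] : List Int)).modify w []
          (· ++ [c])).contains c = false := by
        rw [pvContains_eq_any, hB2]; simp [hwc]
      have hB3 : (((PySem.Dict.empty.insert w ([] : List Int)).modify w []
          (· ++ [c])).setdefault c []).items = [(w, [c]), (c, ([] : List Int))] := by
        rw [PySem.Dict.setdefault_of_not_contains _ _ hB2c,
          PySem.Dict.items_insert_of_not_contains _ _ hB2c, hB2]
        rfl
      have hB3c : (((PySem.Dict.empty.insert w ([] : List Int)).modify w []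
          (· ++ [c])).setdefault c []).contains c = true := by
        rw [pvContains_eq_any, hB3]; simp
      have hB3n : (((PySem.Dict.empty.insert w ([] : List Int)).modify w []
          (· ++ [c])).setdefault c []).keys.Nodup := by
        rw [pvKeys_eq, hB3]; simp [hc, Ne.symm hc]
      have hB4 : ((((PySem.Dict.empty.insert w ([] : List Int)).modify w []
          (· ++ [c])).setdefault c []).modify c [] (· ++ [w])).items
          = [(w, [c]), (c, [w])] := by
        rw [pvItems_modify_mem _ _ _ hB3c hB3n, hB3]
        simp [pvUpd, hwc, hc, Ne.symm hc]
      right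
      refine ⟨?_, rfl, ?_, ?_, ?_⟩
      · exact PySem.Dict.ext (hA5.trans hB4.symm)
      · rw [pvContains_eq_any, hB4]; simp
      · rw [pvKeys_eq, hB4]; simp [hc, Ne.symm hc]
      · rw [hB4]; simp
  · by_cases hc : c = w
    · subst hc
      unfold pvStepA pvStepB
      rw [hd]
      simp only [hcw, if_true, ne_eq, not_true_eq_false, if_false]
      right
      exact ⟨rfl, ht, hcw, hnd, hvals⟩
    · -- a later switch: both dicts receive the same two appends
      have hd' : sa.1 = sb.1 := hd
      unfold pvStepA pvStepB
      rw [hd', PySem.Dict.setdefault_of_contains _ _ hcw]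
      simp only [ne_eq, hc, not_false_eq_true, if_true]
      have hIcne : ∀ p ∈ (sb.1.modify w [] (· ++ [c])).items, p.1 ≠ c → True := fun _ _ _ => trivial
      have hB1 : (sb.1.modify w [] (· ++ [c])).items = sb.1.items.map (pvUpd w c) :=
        pvItems_modify_mem _ _ _ hcw hnd
      have hB1n : (sb.1.modify w [] (· ++ [c])).keys.Nodup := by
        rw [pvKeys_eq, hB1, pvKeys_map_upd]; exact hnd
      by_cases hdc : sb.1.contains c = true
      · -- c already a key
        simp only [hdc, if_true]
        have hA1 : (sb.1.modify c [] (· ++ [w])).items = sb.1.items.map (pvUpd c w) :=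
          pvItems_modify_mem _ _ _ hdc hnd
        have hA1c : (sb.1.modify c [] (· ++ [w])).contains w = true := by
          rw [pvContains_eq_any, hA1, pvAny_fst_map_upd, ← pvContains_eq_any]; exact hcw
        have hA1n : (sb.1.modify c [] (· ++ [w])).keys.Nodup := by
          rw [pvKeys_eq, hA1, pvKeys_map_upd]; exact hnd
        have hA2 : ((sb.1.modify c [] (· ++ [w])).modify w [] (· ++ [c])).items
            = (sb.1.items.map (pvUpd c w)).map (pvUpd w c) := by
          rw [pvItems_modify_mem _ _ _ hA1c hA1n, hA1]
        have hB2c : (sb.1.modify w [] (· ++ [c])).contains c = true := by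
          rw [pvContains_eq_any, hB1, pvAny_fst_map_upd, ← pvContains_eq_any]; exact hdc
        rw [PySem.Dict.setdefault_of_contains _ _ hB2c]
        have hB3 : ((sb.1.modify w [] (· ++ [c])).modify c [] (· ++ [w])).items
            = (sb.1.items.map (pvUpd w c)).map (pvUpd c w) := by
          rw [pvItems_modify_mem _ _ _ hB2c hB1n, hB1]
        have hitems : ((sb.1.modify c [] (· ++ [w])).modify w [] (· ++ [c])).items
            = ((sb.1.modify w [] (· ++ [c])).modify c [] (· ++ [w])).items := by
          rw [hA2, hB3, pvMap_upd_comm _ _ _ _ _ hc]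
        right
        refine ⟨?_, ?_, ?_, ?_, ?_⟩
        · exact PySem.Dict.ext hitems
        · simp [ht]
        · show (_ : PySem.Dict Int (List Int)).contains c = true
          rw [pvContains_eq_any, hB3, pvAny_fst_map_upd, pvAny_fst_map_upd,
            ← pvContains_eq_any]
          exact hdc
        · show (_ : PySem.Dict Int (List Int)).keys.Nodup
          rw [pvKeys_eq, hB3, pvKeys_map_upd, pvKeys_map_upd]; exact hnd
        · show ∀ p ∈ (_ : PySem.Dict Int (List Int)).items, p.2 ≠ ([] : List Int)
          rw [hB3]
          exact pvSnd_map_upd _ _ (pvSnd_map_upd _ _ hvals)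
      · -- c is a fresh key
        have hdc' : sb.1.contains c = false := by
          cases h : sb.1.contains c
          · rfl
          · exact absurd h hdc
        have hfst : ∀ p ∈ sb.1.items, p.1 ≠ c := pvNotContains_forall hdc'
        have hfst' : ∀ p ∈ sb.1.items.map (pvUpd w c), p.1 ≠ c := by
          intro p hp
          obtain ⟨q, hq, rfl⟩ := List.mem_map.mp hp
          rw [pvFst_upd]
          exact hfst q hq
        simp only [hdc', Bool.false_eq_true, if_false]
        -- A side
        have hA1 : (sb.1.insert c []).items = sb.1.items ++ [(c, ([] : List Int))] :=
          PySem.Dict.items_insert_of_not_contains _ _ hdc'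
        have hA1c : (sb.1.insert c []).contains c = true := by
          rw [pvContains_eq_any, hA1]; simp
        have hA1n : (sb.1.insert c []).keys.Nodup := by
          rw [pvKeys_eq, hA1]
          simpa using pvNodup_append_key _ c hnd hfst
        have hA2 : ((sb.1.insert c []).modify c [] (· ++ [w])).items
            = sb.1.items ++ [(c, [w])] := by
          rw [pvItems_modify_mem _ _ _ hA1c hA1n, hA1, List.map_append,
            pvMap_upd_id _ _ _ hfst]
          simp [pvUpd]
        have hA2c : ((sb.1.insert c []).modify c [] (· ++ [w])).contains w = true := by
          rw [pvContains_eq_any, hA2, List.any_append, ← pvContains_eq_any, hcw]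
          simp
        have hA2n : ((sb.1.insert c []).modify c [] (· ++ [w])).keys.Nodup := by
          rw [pvKeys_eq, hA2]
          simpa using pvNodup_append_key _ c hnd hfst
        have hA3 : (((sb.1.insert c []).modify c [] (· ++ [w])).modify w [] (· ++ [c])).items
            = sb.1.items.map (pvUpd w c) ++ [(c, [w])] := by
          rw [pvItems_modify_mem _ _ _ hA2c hA2n, hA2, List.map_append]
          congr 1
          simp [pvUpd, hc]
        -- B side
        have hB2c : (sb.1.modify w [] (· ++ [c])).contains c = false := by
          rw [pvContains_eq_any, hB1, pvAny_fst_map_upd, ← pvContains_eq_any]; exact hdc'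
        rw [PySem.Dict.setdefault_of_not_contains _ _ hB2c]
        have hB3 : ((sb.1.modify w [] (· ++ [c])).insert c []).items
            = sb.1.items.map (pvUpd w c) ++ [(c, ([] : List Int))] := by
          rw [PySem.Dict.items_insert_of_not_contains _ _ hB2c, hB1]
        have hB3c : ((sb.1.modify w [] (· ++ [c])).insert c []).contains c = true := by
          rw [pvContains_eq_any, hB3]; simp
        have hB3n : ((sb.1.modify w [] (· ++ [c])).insert c []).keys.Nodup := by
          rw [pvKeys_eq, hB3]
          have h2 : (sb.1.items.map (pvUpd w c)).map (·.1) |>.Nodup := by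
            rw [pvKeys_map_upd]; exact hnd
          simpa using pvNodup_append_key _ c h2 hfst'
        have hB4 : (((sb.1.modify w [] (· ++ [c])).insert c []).modify c [] (· ++ [w])).items
            = sb.1.items.map (pvUpd w c) ++ [(c, [w])] := by
          rw [pvItems_modify_mem _ _ _ hB3c hB3n, hB3, List.map_append,
            pvMap_upd_id _ _ _ hfst']
          simp [pvUpd]
        right
        refine ⟨?_, ?_, ?_, ?_, ?_⟩
        · exact PySem.Dict.ext (hA3.trans hB4.symm)
        · simp [ht]
        · show (_ : PySem.Dict Int (List Int)).contains c = true
          rw [pvContains_eq_any, hB4]; simp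
        · show (_ : PySem.Dict Int (List Int)).keys.Nodup
          rw [pvKeys_eq, hB4]
          have h2 : (sb.1.items.map (pvUpd w c)).map (·.1) |>.Nodup := by
            rw [pvKeys_map_upd]; exact hnd
          simpa using pvNodup_append_key _ c h2 hfst'
        · show ∀ p ∈ (_ : PySem.Dict Int (List Int)).items, p.2 ≠ ([] : List Int)
          rw [hB4]
          intro p hp
          rcases List.mem_append.mp hp with hp | hp
          · exact pvSnd_map_upd _ _ hvals p hp
          · simp at hp; subst hp; simp

theorem pvChain (ys : List Int) : ∀ (w : Int) (sa sb : PySem.Dict Int (List Int) × Int),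
    pvInv w sa sb →
    pvInv (ys.getLastD w)
      (((w :: ys).zip ys).foldl (fun st pc => pvStepA st pc.1 pc.2) sa)
      (((w :: ys).zip ys).foldl (fun st pc => pvStepB st pc.1 pc.2) sb) := by
  induction ys with
  | nil => intro w sa sb h; simpa using h
  | cons c ys ih =>
    intro w sa sb h
    simp only [List.zip_cons_cons, List.foldl_cons, List.getLastD_cons]
    exact ih c _ _ (pvStep_inv w c sa sb h)

-- ---- Bridging A's index loop to the pair loop ----

theorem pvZip_eq_range_map (xs : List Int) :
    xs.zip xs.tail
      = (List.range (xs.length - 1)).map (fun j => (xs.getD j 0, xs.getD (j + 1) 0)) := by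
  induction xs with
  | nil => rfl
  | cons x t ih =>
    cases t with
    | nil => rfl
    | cons y u =>
      have ih' := ih
      simp only [List.tail_cons] at ih'
      simp only [List.tail_cons, List.zip_cons_cons, ih', List.length_cons, Nat.add_sub_cancel,
        List.range_succ_eq_map, List.map_cons, List.map_map]
      simp

theorem pvFoldA_to_zip {σ : Type} (xs : List Int) (f : σ → Int → Int → σ) (init : σ) :
    (PySem.List.pyRange 1 (xs.length : Int) 1).foldl
        (fun st i => f st (PySem.List.pyGetD xs (i - 1) 0) (PySem.List.pyGetD xs i 0)) init
      = (xs.zip xs.tail).foldl (fun st pc => f st pc.1 pc.2) init := by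
  rw [PySem.List.pyRange_one, List.foldl_map, pvZip_eq_range_map, List.foldl_map]
  have hlen : ((xs.length : Int) - 1).toNat = xs.length - 1 := by omega
  rw [hlen]
  apply PySem.List.foldl_congr_mem
  intro acc j hj
  rw [List.mem_range] at hj
  have h1 : (1 : Int) + (j : Int) - 1 = ((j : Nat) : Int) := by omega
  have h2 : (1 : Int) + (j : Int) = ((j + 1 : Nat) : Int) := by push_cast; omega
  rw [h1, h2, PySem.List.pyGetD_natCast, PySem.List.pyGetD_natCast]

-- ---- Phase 2: the two maximum-profit loops agree ----

theorem pvPhase2 (d : PySem.Dict Int (List Int)) (hnd : d.keys.Nodup)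
    (hne : ∀ p ∈ d.items, p.2 ≠ ([] : List Int)) :
    d.keys.foldl
        (fun (mp : Int) k =>
          let l := d.getD k []
          if l.length > 0 then
            let tmp := pvProfit l k
            if tmp > mp then tmp else mp
          else mp) 0
      = d.items.foldl
          (fun (best : Int) va =>
            let sum_old := pvAbsSum va.2 va.1
            let sum_new :=
              (PySem.List.min? (va.2.map (fun c => pvAbsSum va.2 c)) (fun x => x)).getD 0
            if sum_old - sum_new > best then sum_old - sum_new else best) 0 := by
  have hkeys : d.keys = d.items.map (·.1) := rfl
  rw [hkeys, List.foldl_map]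
  apply PySem.List.foldl_congr_mem
  intro mp p hp
  have hget : d.getD p.1 [] = p.2 :=
    PySem.Dict.getD_of_mem_items d (by simpa using hp) hnd []
  have hnil := hne p hp
  have hlen : p.2.length > 0 := List.length_pos_iff.mpr hnil
  simp only [hget, if_pos hlen, pvProfit_eq_min p.2 hnil p.1]

-- ===== VERDICT (by name: the statement is the Claim_ definition above) =====
theorem calculate_minimum_page_turns_spec : Claim_equal_calculate_minimum_page_turns := by
  intro n m pages hdom hpre
  unfold Spec_calculate_minimum_page_turns
  obtain ⟨p0, rest, rfl⟩ : ∃ p0 rest, pages = p0 :: rest := by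
    cases pages with
    | nil => exact absurd rfl hpre
    | cons x xs => exact ⟨x, xs, rfl⟩
  unfold calculate_minimum_page_turns calculate_minimum_page_turns_alt
  rw [PySem.List.pyGet?_zero_cons]
  simp only [PySem.List.slice_from_one, List.tail_cons]
  rw [pvFoldA_to_zip (p0 :: rest) pvStepA ((PySem.Dict.empty.insert p0 []), 0)]
  simp only [List.tail_cons]
  have hinit : pvInv p0 ((PySem.Dict.empty.insert p0 []), 0) ((PySem.Dict.empty : PySem.Dict Int (List Int)), 0) := by
    left
    refine ⟨?_, rfl⟩
    have hit : (PySem.Dict.empty.insert p0 ([] : List Int)).items = [(p0, ([] : List Int))] := by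
      rw [PySem.Dict.items_insert_of_not_contains _ _ (PySem.Dict.contains_empty p0)]
      rfl
    rw [Prod.mk.injEq]
    exact ⟨PySem.Dict.ext hit, rfl⟩
  have hfin := pvChain rest p0 _ _ hinit
  set saF := ((p0 :: rest).zip rest).foldl (fun st pc => pvStepA st pc.1 pc.2)
      ((PySem.Dict.empty.insert p0 []), 0) with hsa
  set sbF := ((p0 :: rest).zip rest).foldl (fun st pc => pvStepB st pc.1 pc.2)
      ((PySem.Dict.empty : PySem.Dict Int (List Int)), 0) with hsb
  rcases hfin with ⟨ha, hb⟩ | ⟨hd, ht, _, hnd, hvals⟩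
  · rw [ha, hb]
    simp [PySem.Dict.getD_eq_get?_getD, PySem.Dict.get?_mk_cons, PySem.Dict.keys,
      PySem.Dict.empty, PySem.Dict.items]
  · rw [hd, ht, pvPhase2 sbF.1 hnd hvals]
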